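-- pv_equiv track=rewrite | github.com/ArduPilot/ardupilot | Tools/autotest/logger_metadata/emit_rst.py | tablify_row
-- ===== SOURCE A (Python) =====
-- def tablify_row(rowheading, row, widths, height):
--     joiner = "|"
--
--     row_lines = [x.split("\n") for x in row]
--     for row_line in row_lines:
--         row_line.extend([""] * (height - len(row_line)))
--     if rowheading is not None:
--         rowheading_lines = rowheading.split("\n")
--         rowheading_lines.extend([""] * (height - len(rowheading_lines)))
--
--     out_lines = []
--     for i in range(0, height):
--         out_line = ""
--         if rowheading is not None:
--             rowheading_line = rowheading_lines[i]
--             out_line += joiner + " " + rowheading_line + " " * (widths[0] - len(rowheading_line) - 1)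
--             joiner = "#"
--         j = 0
--         for item in row_lines:
--             widthnum = j
--             if rowheading is not None:
--                 widthnum += 1
--             line = item[i]
--             out_line += joiner + " " + line + " " * (widths[widthnum] - len(line) - 1)
--             joiner = "|"
--             j += 1
--         out_line += "|"
--         out_lines.append(out_line)
--     return "\n".join(out_lines)
-- ===== SOURCE B (Python) =====
-- def tablify_row(rowheading, row, widths, height):
--     h = max(height, 0)
--     texts = row if rowheading is None else [rowheading] + list(row)
--     lines = [""] * h
--
--     # column-major: walk the columns once, appending each column's cells to
--     # every line; no per-line joiner state and no padding of the cell lists.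
--     for k, text in enumerate(texts):
--         sep = "#" if rowheading is not None and k == 1 else "|"
--         cells = text.split("\n")
--         for i in range(h):
--             cell = cells[i] if i < len(cells) else ""
--             lines[i] += sep + " " + cell + " " * (widths[k] - len(cell) - 1)
--
--     return "\n".join(line + "|" for line in lines)
-- ===== Notes on version B (the rewrite author's own statement) =====
-- stated objective: alternative
-- what changed: B transposes the traversal: instead of A's line-by-line rendering with a mutable joiner threaded across lines, B walks the columns once (column-major), appending each column's separator+cell+padding to every line's accumulator, with the '#' separator decided purely from the column index.
-- intended difference: When rowheading is not None, row is empty and height >= 2, A starts every output line after the first with '#' because the joiner variable set for the missing first data cell leaks into the next line; B starts every line with '|', the intended heading separator. — e.g. on tablify_row(some "h", [], [3], 2): A returns "| h |\n# |", B returns "| h |\n| |"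
import Mathlib
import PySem

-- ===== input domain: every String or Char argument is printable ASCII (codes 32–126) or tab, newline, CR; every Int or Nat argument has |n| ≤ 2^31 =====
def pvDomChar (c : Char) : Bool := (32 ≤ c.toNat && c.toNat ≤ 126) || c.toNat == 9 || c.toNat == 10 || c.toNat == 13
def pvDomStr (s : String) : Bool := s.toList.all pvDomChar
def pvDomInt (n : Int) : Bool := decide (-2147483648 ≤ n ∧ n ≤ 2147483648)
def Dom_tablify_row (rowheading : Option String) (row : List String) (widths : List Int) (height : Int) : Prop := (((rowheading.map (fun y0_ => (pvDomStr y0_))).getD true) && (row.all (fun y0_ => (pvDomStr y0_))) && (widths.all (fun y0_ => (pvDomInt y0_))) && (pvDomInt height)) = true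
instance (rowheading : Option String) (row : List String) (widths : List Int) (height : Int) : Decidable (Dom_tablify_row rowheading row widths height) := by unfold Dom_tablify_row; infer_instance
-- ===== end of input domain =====

-- B transposes the traversal (column-major: one pass over the columns appending to every
-- line's accumulator, '#' decided from the column index) instead of A's line-by-line
-- rendering with a joiner variable threaded across lines; equivalence is proved outside
-- the D_ corner stated below.

-- ===== PORT A =====
-- " " * n  (a non-positive n gives "", as in Python)
def pvSpaces (n : Int) : String := String.ofList (List.replicate n.toNat ' ')

-- s.split("\n"); the separator is non-empty, so split? never returns none
def pvSplitNl (s : String) : List String := (PySem.Str.split? s "\n").getD []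

-- x.split("\n") extended by [""] * (height - len(...)) (Python's list * negative = [])
def pvExtend (s : String) (height : Int) : List String :=
  let ls := pvSplitNl s
  ls ++ List.replicate (height - (ls.length : Int)).toNat ""

-- body of A's inner `for item in row_lines` loop; state = (joiner, out_line, j)
def pvAInner (widths : List Int) (off : Nat) (i : Nat)
    (st : String × String × Nat) (item : List String) : String × String × Nat :=
  let line := item.getD i ""
  ("|",
   st.2.1 ++ st.1 ++ " " ++ line ++ pvSpaces (widths.getD (st.2.2 + off) 0 - PySem.Str.len line - 1),
   st.2.2 + 1)

-- body of A's outer `for i in range(0, height)` loop; state = (joiner, out_lines)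
def pvALine (rowheading : Option String) (rhl : List String) (rls : List (List String))
    (widths : List Int) (st : String × List String) (i : Nat) : String × List String :=
  let start : String × String :=
    match rowheading with
    | some _ =>
      let rl := rhl.getD i ""
      ("#", st.1 ++ " " ++ rl ++ pvSpaces (widths.getD 0 0 - PySem.Str.len rl - 1))
    | none => (st.1, "")
  let off : Nat := if rowheading.isSome then 1 else 0
  let r := rls.foldl (pvAInner widths off i) (start.1, start.2, 0)
  (r.1, st.2 ++ [r.2.1 ++ "|"])

def tablify_row (rowheading : Option String) (row : List String) (widths : List Int) (height : Int) : String :=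
  let row_lines := row.map (fun x => pvExtend x height)
  let rowheading_lines : List String :=
    match rowheading with
    | some rh => pvExtend rh height
    | none => []
  let r := (List.range height.toNat).foldl (pvALine rowheading rowheading_lines row_lines widths) ("|", [])
  PySem.Str.join "\n" r.2

-- ===== PORT B =====
-- body of B's `for k, text in enumerate(texts)` loop; state = (k, lines); the inner
-- `for i in range(h)` index-update loop is the map over List.range lines.length
def pvBStep (hs : Bool) (widths : List Int) (st : Nat × List String) (text : String) : Nat × List String :=
  let sep : String := if hs && st.1 == 1 then "#" else "|"
  let cells := pvSplitNl text
  (st.1 + 1,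
   (List.range st.2.length).map (fun i =>
     st.2.getD i "" ++ sep ++ " " ++ cells.getD i ""
       ++ pvSpaces (widths.getD st.1 0 - PySem.Str.len (cells.getD i "") - 1)))

def tablify_row_alt (rowheading : Option String) (row : List String) (widths : List Int) (height : Int) : String :=
  let h := max height 0
  let texts : List String := match rowheading with | none => row | some rh => rh :: row
  let lines := (texts.foldl (pvBStep rowheading.isSome widths) (0, List.replicate h.toNat "")).2
  PySem.Str.join "\n" (lines.map (fun l => l ++ "|"))

-- ===== PRECONDITION & SPEC =====
-- Pre_ excludes exactly the inputs where A raises IndexError: with at least one output line,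
-- widths must have one entry per rendered column (row cells plus the optional heading).
def Pre_tablify_row (rowheading : Option String) (row : List String) (widths : List Int) (height : Int) : Prop :=
  height ≤ 0 ∨ row.length + (if rowheading.isSome then 1 else 0) ≤ widths.length
instance (rowheading : Option String) (row : List String) (widths : List Int) (height : Int) : Decidable (Pre_tablify_row rowheading row widths height) := by unfold Pre_tablify_row; infer_instance

def pvWitness_tablify_row : Option String × List String × List Int × Int := (some "h", ["a"], [3, 3], 1)

-- When rowheading is not None, row is empty and height >= 2, A starts every output line after the
-- first with '#' (the joiner set for the missing first data cell leaks into the next line); B starts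
-- every line with '|', the intended heading separator.
def D_tablify_row (rowheading : Option String) (row : List String) (widths : List Int) (height : Int) : Prop :=
  rowheading.isSome = true ∧ row = [] ∧ 2 ≤ height
instance (rowheading : Option String) (row : List String) (widths : List Int) (height : Int) : Decidable (D_tablify_row rowheading row widths height) := by unfold D_tablify_row; infer_instance

def Spec_tablify_row (rowheading : Option String) (row : List String) (widths : List Int) (height : Int) (out : String) : Prop := ¬ D_tablify_row rowheading row widths height → out = tablify_row_alt rowheading row widths height
instance (rowheading : Option String) (row : List String) (widths : List Int) (height : Int) (out : String) : Decidable (Spec_tablify_row rowheading row widths height out) := by unfold Spec_tablify_row; infer_instance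

def pvDiffWitness_tablify_row : Option String × List String × List Int × Int := (some "h", [], [3], 2)
def pvDiffWitnessOut_tablify_row : String × String := ("| h |\n#   |", "| h |\n|   |")

-- ===== CLAIM (what is proved, stated in full; the proofs are below) =====
def Claim_unchanged_tablify_row : Prop := ∀ (rowheading : Option String) (row : List String) (widths : List Int) (height : Int), Dom_tablify_row rowheading row widths height → Pre_tablify_row rowheading row widths height → Spec_tablify_row rowheading row widths height (tablify_row rowheading row widths height)
def Claim_changed_tablify_row : Prop := Dom_tablify_row (pvDiffWitness_tablify_row.1) (pvDiffWitness_tablify_row.2.1) (pvDiffWitness_tablify_row.2.2.1) (pvDiffWitness_tablify_row.2.2.2) ∧ Pre_tablify_row (pvDiffWitness_tablify_row.1) (pvDiffWitness_tablify_row.2.1) (pvDiffWitness_tablify_row.2.2.1) (pvDiffWitness_tablify_row.2.2.2) ∧ D_tablify_row (pvDiffWitness_tablify_row.1) (pvDiffWitness_tablify_row.2.1) (pvDiffWitness_tablify_row.2.2.1) (pvDiffWitness_tablify_row.2.2.2) ∧ tablify_row (pvDiffWitness_tablify_row.1) (pvDiffWitness_tablify_row.2.1) (pvDiffWitness_tablify_row.2.2.1)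 (pvDiffWitness_tablify_row.2.2.2) = pvDiffWitnessOut_tablify_row.1 ∧ tablify_row_alt (pvDiffWitness_tablify_row.1) (pvDiffWitness_tablify_row.2.1) (pvDiffWitness_tablify_row.2.2.1) (pvDiffWitness_tablify_row.2.2.2) = pvDiffWitnessOut_tablify_row.2 ∧ pvDiffWitnessOut_tablify_row.1 ≠ pvDiffWitnessOut_tablify_row.2

def Claim_exact_tablify_row : Prop := ∀ (rowheading : Option String) (row : List String) (widths : List Int) (height : Int), Dom_tablify_row rowheading row widths height → Pre_tablify_row rowheading row widths height → D_tablify_row rowheading row widths height → tablify_row rowheading row widths height ≠ tablify_row_alt rowheading row widths height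

-- ===== LEMMAS AND PROOFS =====

-- the rendering of one line as A's inner loop produces it: separators, per-column line lists,
-- remaining widths
def pvCat (i : Nat) : List String → List (List String) → List Int → String
  | s :: ss, c :: cs, ws =>
      (s ++ " " ++ c.getD i "" ++ pvSpaces (ws.headD 0 - PySem.Str.len (c.getD i "") - 1))
        ++ pvCat i ss cs (ws.drop 1)
  | _, _, _ => ""

-- the rendering of one line as B produces it while walking columns from index k
def pvRow (hs : Bool) (widths : List Int) (i : Nat) : Nat → List String → String
  | _, [] => ""
  | k, t :: ts =>
      (if hs && k == 1 then "#" else "|") ++ " " ++ (pvSplitNl t).getD i ""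
        ++ pvSpaces (widths.getD k 0 - PySem.Str.len ((pvSplitNl t).getD i "") - 1)
        ++ pvRow hs widths i (k + 1) ts

theorem pv_getD_drop (l : List Int) (n : Nat) : l.getD n 0 = (l.drop n).headD 0 := by
  simp [List.getD, List.headD_eq_head?_getD, List.head?_drop]

theorem pvCat_nil_cols (i : Nat) (ss : List String) (ws : List Int) : pvCat i ss [] ws = "" := by
  cases ss <;> simp [pvCat]

theorem pvCat_rep (i : Nat) (cs : List (List String)) (ws : List Int) :
    pvCat i (List.replicate cs.length "|") cs ws
      = pvCat i ("|" :: List.replicate (cs.length - 1) "|") cs ws := by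
  cases cs <;> simp [pvCat, pvCat_nil_cols, List.replicate_succ]

theorem pvAInner_foldl (widths : List Int) (off i : Nat) :
    ∀ (items : List (List String)) (j0 s0 : String) (k : Nat),
    items.foldl (pvAInner widths off i) (j0, s0, k)
      = ((if items = [] then j0 else "|"),
         s0 ++ pvCat i (j0 :: List.replicate (items.length - 1) "|") items (widths.drop (k + off)),
         k + items.length) := by
  intro items
  induction items with
  | nil => intro j0 s0 k; simp [pvCat]
  | cons it rest ih =>
    intro j0 s0 k
    rw [List.foldl_cons]
    simp only [pvAInner]
    rw [ih]
    have h2 : (widths.drop (k + off)).drop 1 = widths.drop (k + 1 + off) := by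
      rw [List.drop_drop]; congr 1; omega
    simp only [List.length_cons, Nat.add_sub_cancel, pvCat, h2, ← pv_getD_drop, ← pvCat_rep]
    refine Prod.ext ?_ (Prod.ext ?_ ?_)
    · simp
    · simp [String.append_assoc]
    · show k + 1 + rest.length = k + (it :: rest).length
      simp only [List.length_cons]
      exact (Nat.add_right_comm k 1 rest.length).trans (Nat.add_assoc k rest.length 1)

theorem pv_foldl_state_map {α β γ : Type} (f : γ × List β → α → γ × List β) (g : α → β) (c : γ)
    (hf : ∀ acc i, f (c, acc) i = (c, acc ++ [g i])) :
    ∀ (l : List α) (acc : List β), l.foldl f (c, acc) = (c, acc ++ l.map g) := by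
  intro l
  induction l with
  | nil => intro acc; simp
  | cons x xs ihx => intro acc; rw [List.foldl_cons, hf, ihx]; simp

-- A's line-loop body appends one rendered line and restores joiner "|" whenever the
-- rendered line ends in a data cell (row ≠ []) or there is no heading.
theorem pvALine_none (rls : List (List String)) (widths : List Int) (acc : List String) (i : Nat) :
    pvALine none [] rls widths ("|", acc) i
      = ("|", acc ++ [pvCat i ("|" :: List.replicate (rls.length - 1) "|") rls widths ++ "|"]) := by
  simp only [pvALine]
  rw [pvAInner_foldl]
  refine Prod.ext ?_ ?_
  · cases rls <;> simp
  · simp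

theorem pvALine_some (rh : String) (rhl : List String) (rls : List (List String))
    (widths : List Int) (acc : List String) (i : Nat) (hr : rls ≠ []) :
    pvALine (some rh) rhl rls widths ("|", acc) i
      = ("|", acc ++ [("|" ++ " " ++ rhl.getD i "" ++ pvSpaces (widths.getD 0 0 - PySem.Str.len (rhl.getD i "") - 1)
            ++ pvCat i ("#" :: List.replicate (rls.length - 1) "|") rls (widths.drop 1)) ++ "|"]) := by
  simp only [pvALine]
  rw [pvAInner_foldl]
  refine Prod.ext ?_ ?_
  · exact if_neg hr
  · simp [String.append_assoc]

-- B's cell lookup needs no padding: getD with default "" on the padded list is getD on the split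
theorem pv_cells_getD (s : String) (height : Int) (i : Nat) :
    (pvExtend s height)[i]?.getD "" = (pvSplitNl s)[i]?.getD "" := by
  simp only [pvExtend]
  by_cases h : i < (pvSplitNl s).length
  · rw [List.getElem?_append_left h]
  · rw [List.getElem?_append_right (by omega)]
    rw [List.getElem?_eq_none (by omega) (l := pvSplitNl s)]
    rw [List.getElem?_replicate]
    split_ifs <;> simp

-- B's column fold, with lines generalized to an arbitrary indexed family
theorem pvBStep_foldl (hs : Bool) (widths : List Int) (h : Nat) :
    ∀ (ts : List String) (k : Nat) (g : Nat → String),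
    ts.foldl (pvBStep hs widths) (k, (List.range h).map g)
      = (k + ts.length, (List.range h).map (fun i => g i ++ pvRow hs widths i k ts)) := by
  intro ts
  induction ts with
  | nil => intro k g; simp [pvRow]
  | cons t rest ih =>
    intro k g
    rw [List.foldl_cons]
    have hstep : pvBStep hs widths (k, (List.range h).map g) t
        = (k + 1, (List.range h).map (fun i =>
            g i ++ ((if hs && k == 1 then "#" else "|") ++ " " ++ (pvSplitNl t).getD i ""
              ++ pvSpaces (widths.getD k 0 - PySem.Str.len ((pvSplitNl t).getD i "") - 1)))) := by
      simp only [pvBStep, List.length_map, List.length_range]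
      refine Prod.ext rfl ?_
      refine List.map_congr_left fun i hi => ?_
      rw [PySem.List.getD_map_range g h i "" (List.mem_range.mp hi)]
      simp [String.append_assoc]
    rw [hstep, ih]
    refine Prod.ext (by simp; omega) ?_
    refine List.map_congr_left fun i _ => ?_
    simp [pvRow, String.append_assoc]

-- B's uniform tail: once past the heading/'#' position the separator is always "|",
-- and the line tail is exactly A's pvCat rendering
theorem pvRow_uniform (widths : List Int) (height : Int) (i : Nat) (hs : Bool) :
    ∀ (ts : List String) (k : Nat), (hs = false ∨ 2 ≤ k) →
    pvRow hs widths i k ts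
      = pvCat i (List.replicate ts.length "|") (ts.map (fun x => pvExtend x height)) (widths.drop k) := by
  intro ts
  induction ts with
  | nil => intro k _; simp [pvRow, pvCat]
  | cons t rest ih =>
    intro k hk
    have hsep : (hs && k == 1) = false := by
      rcases hk with h | h
      · simp [h]
      · have : (k == 1) = false := by simp; omega
        simp [this]
    have hdd : (widths.drop k).drop 1 = widths.drop (k + 1) := by
      rw [List.drop_drop]
    simp only [pvRow, hsep, List.length_cons, List.replicate_succ, List.map_cons, pvCat, hdd,
      ← pv_getD_drop, Bool.false_eq_true, if_neg, not_false_iff]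
    rw [ih (k + 1) (by rcases hk with h | h; exacts [Or.inl h, Or.inr (by omega)])]
    simp [pv_cells_getD, String.append_assoc]

theorem pv_replicate_eq_map_range (n : Nat) :
    List.replicate n ("" : String) = (List.range n).map (fun _ => "") := by
  simp

-- ===== auxiliary definitions for the tightness proof =====
-- line rendered by either port when the row is empty and the heading is rh: joiner, heading cell, "|"
def pvALn (rh : String) (height w : Int) (j : String) (i : Nat) : String :=
  j ++ " " ++ (pvExtend rh height).getD i ""
    ++ pvSpaces (w - PySem.Str.len ((pvExtend rh height).getD i "") - 1) ++ "|"

theorem pvALine_empty (rh : String) (height w : Int) (ws : List Int) (acc : List String)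
    (j : String) (i : Nat) :
    pvALine (some rh) (pvExtend rh height) [] (w :: ws) (j, acc) i
      = ("#", acc ++ [pvALn rh height w j i]) := by
  simp only [pvALine]
  rw [pvAInner_foldl]
  refine Prod.ext (by simp) ?_
  simp [pvCat_nil_cols, pvALn, String.append_assoc]

theorem tablify_row_empty_row (rh : String) (w : Int) (ws : List Int) (height : Int) (n : Nat)
    (hk : height.toNat = n + 1) :
    tablify_row (some rh) [] (w :: ws) height
      = PySem.Str.join "\n"
          (pvALn rh height w "|" 0 :: (List.range n).map (fun i => pvALn rh height w "#" (i + 1))) := by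
  simp only [tablify_row, List.map_nil]
  rw [hk, List.range_succ_eq_map, List.foldl_cons, pvALine_empty,
    pv_foldl_state_map _ (pvALn rh height w "#") "#"
      (fun acc i => pvALine_empty rh height w ws acc "#" i)]
  simp [List.map_map, Function.comp_def]

theorem tablify_row_alt_empty_row (rh : String) (w : Int) (ws : List Int) (height : Int) :
    tablify_row_alt (some rh) [] (w :: ws) height
      = PySem.Str.join "\n" ((List.range height.toNat).map (pvALn rh height w "|")) := by
  have ht : (max height 0).toNat = height.toNat := by omega
  simp only [tablify_row_alt, ht, pv_replicate_eq_map_range]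
  rw [pvBStep_foldl]
  refine congrArg _ ?_
  rw [List.map_map]
  refine List.map_congr_left fun i _ => ?_
  simp [pvRow, pvALn, pv_cells_getD, String.append_assoc]

theorem pvALn_toList (rh : String) (height w : Int) (j : String) (c : Char)
    (hj : j.toList = [c]) (i : Nat) :
    (pvALn rh height w j i).toList
      = c :: (" " ++ (pvExtend rh height).getD i ""
          ++ pvSpaces (w - PySem.Str.len ((pvExtend rh height).getD i "") - 1) ++ "|").toList := by
  simp [pvALn, hj]

theorem pv_join_head (sep : List Char) (a : List Char) (l : List (List Char)) :
    ∃ s, PySem.Chars.join sep (a :: l) = a ++ s := by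
  cases l with
  | nil => exact ⟨[], by simp [PySem.Chars.join_singleton]⟩
  | cons b bs =>
    exact ⟨sep ++ PySem.Chars.join sep (b :: bs),
      by rw [PySem.Chars.join_cons_cons, List.append_assoc]⟩

theorem pv_join_two (x y : String) (l : List String) :
    ∃ s, (PySem.Str.join "\n" (x :: y :: l)).toList = x.toList ++ '\n' :: (y.toList ++ s) := by
  obtain ⟨s, hs⟩ := pv_join_head ['\n'] y.toList (l.map String.toList)
  refine ⟨s, ?_⟩
  simp [PySem.Chars.join_cons_cons, hs]

-- ===== VERDICT (by name: the statement is the Claim_ definition above) =====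
theorem tablify_row_spec : Claim_unchanged_tablify_row := by
  intro rowheading row widths height _hdom hpre hnd
  by_cases hh0 : height ≤ 0
  · have ht : height.toNat = 0 := by omega
    have ht' : (max height 0).toNat = 0 := by omega
    have hrep : List.replicate (0:Nat) ("":String) = (List.range 0).map (fun _ => "") := by simp
    simp only [tablify_row, tablify_row_alt, ht, ht', hrep, pvBStep_foldl]
    cases rowheading <;> simp
  · have hlen : row.length + (if rowheading.isSome then 1 else 0) ≤ widths.length := by
      rcases hpre with h | h
      · omega
      · exact h
    have htoNat : (max height 0).toNat = height.toNat := by omega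
    have hrep : List.replicate height.toNat ("":String)
        = (List.range height.toNat).map (fun _ => "") := by simp
    cases rowheading with
    | none =>
      simp only [tablify_row, tablify_row_alt, htoNat, hrep, pvBStep_foldl, Option.isSome_none]
      rw [pv_foldl_state_map _
        (fun i => pvCat i ("|" :: List.replicate ((row.map (fun x => pvExtend x height)).length - 1) "|")
          (row.map (fun x => pvExtend x height)) widths ++ "|") "|"
        (fun acc i => pvALine_none (row.map (fun x => pvExtend x height)) widths acc i)]
      simp only [List.nil_append, List.map_map]
      refine congrArg (PySem.Str.join "\n") ?_
      refine List.map_congr_left fun i _ => ?_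
      simp only [Function.comp_def]
      rw [pvRow_uniform widths height i false row 0 (Or.inl rfl)]
      have hcr := pvCat_rep i (row.map (fun x => pvExtend x height)) widths
      simp only [List.length_map] at hcr
      simp [List.length_map, hcr]
    | some rh =>
      cases row with
      | nil =>
        have h1 : height = 1 := by
          rcases Classical.em (2 ≤ height) with h2 | h2
          · exact absurd ⟨rfl, rfl, h2⟩ hnd
          · omega
        subst h1
        obtain ⟨w, ws, rfl⟩ : ∃ w ws, widths = w :: ws := by
          cases widths with
          | nil => simp at hlen
          | cons w ws => exact ⟨w, ws, rfl⟩
        rw [tablify_row_empty_row rh w ws 1 0 rfl, tablify_row_alt_empty_row rh w ws 1]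
        simp
      | cons c cs =>
        have hne : (c :: cs).map (fun x => pvExtend x height) ≠ [] := by simp
        simp only [tablify_row, tablify_row_alt, htoNat, hrep, pvBStep_foldl, Option.isSome_some]
        rw [pv_foldl_state_map _
          (fun i => ("|" ++ " " ++ (pvExtend rh height).getD i ""
              ++ pvSpaces (widths.getD 0 0 - PySem.Str.len ((pvExtend rh height).getD i "") - 1)
              ++ pvCat i ("#" :: List.replicate (((c :: cs).map (fun x => pvExtend x height)).length - 1) "|")
                  ((c :: cs).map (fun x => pvExtend x height)) (widths.drop 1)) ++ "|") "|"
          (fun acc i => pvALine_some rh (pvExtend rh height) _ widths acc i hne)]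
        simp only [List.nil_append, List.map_map]
        refine congrArg (PySem.Str.join "\n") ?_
        refine List.map_congr_left fun i _ => ?_
        have hrow2 : pvRow true widths i 2 cs
            = pvCat i (List.replicate cs.length "|") (cs.map (fun x => pvExtend x height))
                (widths.drop 2) := pvRow_uniform widths height i true cs 2 (Or.inr le_rfl)
        have hdd : (widths.drop 1).drop 1 = widths.drop 2 := by
          rw [List.drop_drop]
        simp only [Function.comp_def, pvRow, hrow2, List.length_map, List.length_cons,
          Nat.add_sub_cancel, List.map_cons, pvCat, hdd, ← pv_getD_drop]
        simp [pv_cells_getD, String.append_assoc, List.getD]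

theorem tablify_row_changed : Claim_changed_tablify_row := by
  unfold Claim_changed_tablify_row; decide

theorem tablify_row_tight : Claim_exact_tablify_row := by
  intro rowheading row widths height _hdom hpre hD
  obtain ⟨hsome, hrow, hh⟩ := hD
  subst hrow
  obtain ⟨rh, rfl⟩ := Option.isSome_iff_exists.mp hsome
  obtain ⟨w, ws, rfl⟩ : ∃ w ws, widths = w :: ws := by
    cases widths with
    | nil =>
      exfalso
      rcases hpre with h | h
      · omega
      · simp at h
    | cons w ws => exact ⟨w, ws, rfl⟩
  obtain ⟨k, hk⟩ : ∃ k, height.toNat = (k + 1) + 1 := ⟨height.toNat - 2, by omega⟩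
  intro heq
  rw [tablify_row_empty_row rh w ws height (k + 1) hk,
    tablify_row_alt_empty_row rh w ws height, hk] at heq
  have hA : (List.range (k + 1)).map (fun i => pvALn rh height w "#" (i + 1))
      = pvALn rh height w "#" 1
        :: (List.range k).map (fun i => pvALn rh height w "#" (i + 1 + 1)) := by
    rw [List.range_succ_eq_map]
    simp [List.map_map, Function.comp_def]
  have hB : (List.range (k + 1 + 1)).map (pvALn rh height w "|")
      = pvALn rh height w "|" 0 :: pvALn rh height w "|" 1
        :: (List.range k).map (fun i => pvALn rh height w "|" (i + 1 + 1)) := by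
    rw [List.range_succ_eq_map, List.range_succ_eq_map]
    simp [List.map_map, Function.comp_def]
  rw [hA, hB] at heq
  have e := congrArg String.toList heq
  obtain ⟨sA, hsA⟩ := pv_join_two (pvALn rh height w "|" 0) (pvALn rh height w "#" 1)
    ((List.range k).map (fun i => pvALn rh height w "#" (i + 1 + 1)))
  obtain ⟨sB, hsB⟩ := pv_join_two (pvALn rh height w "|" 0) (pvALn rh height w "|" 1)
    ((List.range k).map (fun i => pvALn rh height w "|" (i + 1 + 1)))
  rw [hsA, hsB] at e
  have e2 := List.append_cancel_left e
  rw [pvALn_toList rh height w "#" '#' rfl 1, pvALn_toList rh height w "|" '|' rfl 1] at e2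
  simp at e2
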